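-- pv_equiv track=rewrite | github.com/seungguJ/Coding-Test | 프로그래머스/3/43238. 입국심사/입국심사.py | solution
-- ===== SOURCE A (Python) =====
-- def solution(n, times):
--     '''
--     binary search
--     최적값 찾기, input이 너무 길때
--
--     최소시간부터 최대시간 사이의 binary search
--         - 1 ~ max(times)*n
--
--     mid 시간에 심사 받은 사람이 n이 넘어가면 안됨
--
--     '''
--
--     left = 1
--     right = max(times) * n
--
--     while left <= right:
--         mid = (left+right)//2
--         people = 0
--
--         for time in times: # 각각 심사대에서 심사 받은 사람 계산
--             people += mid//time
--
--             if people >= n: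
--                 break
--         if people >= n:
--             right = mid -1
--             answer = mid # n명 이상 심사를 해야하는 것이기 때문에 여기에 answer = mid가 들어감
--         else:
--             # 여기에 answer = mid를 넣으면 안됨 만약 n명 이하의 최대 시간이라면 여기에 넣는게 맞을 듯?
--             left = mid + 1
--
--     return answer
-- ===== SOURCE B (Python) =====
-- def solution(n, times):
--     # Rate estimate + short event scan: jump straight to T = ceil(n / total rate)
--     # (exact integer arithmetic, D = prod(times) as common denominator) -- no desk
--     # can finish its n-th person before T -- then advance desk by desk through the
--     # few remaining completion events (fewer than len(times) of them).
--     if n < 1 or not times or any(t < 1 for t in times):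
--         raise ValueError("n and all service times must be positive")
--     D = 1
--     for t in times:
--         D *= t
--     N = sum(D // t for t in times)          # D times the total service rate
--     T = -(-n * D // N)                      # ceil(n*D/N)
--     c = sum(T // t for t in times)          # inspections completed by time T
--     if c >= n:
--         return T
--     nxt = [(T // t + 1) * t for t in times] # each desk's next finish after T
--     while True:
--         f = min(nxt)
--         i = nxt.index(f)
--         c += 1
--         if c >= n:
--             return f
--         nxt[i] = f + times[i]
-- ===== Notes on version B (the rewrite author's own statement) =====
-- stated objective: alternative
-- what changed: Binary search over the time axis is replaced by a closed-form jump: with exact integer arithmetic (common denominator prod(times)) B computes T = ceil(n / total service rate), counts completions at T, and walks the fewer-than-len(times) remaining completion events with a min-scan; no bisection and no counting loop over candidate times.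
-- outside the precondition, e.g. on solution(2, [3, -1]): A returns 6, B raises ValueError; on solution(-1, [-2]): A returns 1, B raises ValueError
import Mathlib
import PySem

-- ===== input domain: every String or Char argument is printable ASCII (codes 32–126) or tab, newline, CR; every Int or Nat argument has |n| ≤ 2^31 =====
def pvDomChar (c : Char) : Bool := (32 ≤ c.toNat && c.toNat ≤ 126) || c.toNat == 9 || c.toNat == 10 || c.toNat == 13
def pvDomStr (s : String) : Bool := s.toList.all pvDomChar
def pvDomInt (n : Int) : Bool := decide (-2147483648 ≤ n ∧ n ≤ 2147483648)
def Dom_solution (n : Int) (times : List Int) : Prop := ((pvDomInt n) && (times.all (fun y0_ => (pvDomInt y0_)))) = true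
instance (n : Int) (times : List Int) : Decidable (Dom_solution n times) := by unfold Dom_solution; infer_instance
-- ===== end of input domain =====

-- B replaces A's binary search over the time axis by a closed-form integer rate estimate
-- (jump to ceil(n / total service rate)) plus a short scan over the remaining completion
-- events; alternative algorithm, return value equal on Pre_.

-- ===== PORT A =====
-- inner 'for time in times' loop with the early 'break' once people >= n
def peopleLoop (n mid : Int) (people : Int) : List Int → Int
  | [] => people
  | t :: ts =>
    let p := people + PySem.Int.floordiv mid t
    if n ≤ p then p else peopleLoop n mid p ts

-- the 'while left <= right' loop; 'answer' starts unbound, modelled as Option Int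
def bsLoop (n : Int) (times : List Int) (left right : Int) (ans : Option Int) : Option Int :=
  if h : left ≤ right then
    let mid := PySem.Int.floordiv (left + right) 2
    if n ≤ peopleLoop n mid 0 times then
      bsLoop n times left (mid - 1) (some mid)
    else
      bsLoop n times (mid + 1) right ans
  else ans
termination_by (right + 1 - left).toNat
decreasing_by
  · have := PySem.Int.floordiv_two_mid_bounds h; omega
  · have := PySem.Int.floordiv_two_mid_bounds h; omega

def solution (n : Int) (times : List Int) : Int :=
  match PySem.List.max? times (fun y => y) with
  | none => 0          -- max([]) raises ValueError: outside Pre_solution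
  | some m => (bsLoop n times 1 (m * n) none).getD 0
      -- the .getD 0 arm is Python's UnboundLocalError (answer never assigned): outside Pre_solution

-- ===== PORT B =====
-- Source B's 'while True' event loop: the fuel is the number of pops it performs (n - c in
-- Source B, which increments c once per pop and returns the pop that reaches c = n)
def simLoop (times : List Int) : Nat → List Int → Int → Int
  | 0, _, f => f
  | k + 1, nxt, f =>
    match PySem.List.min? nxt (fun y => y) with
    | none => f        -- unreachable under the guard (times = [] raises in Source B)
    | some m =>
      match PySem.List.index? nxt m with
      | none => f      -- unreachable: min(nxt) is a member of nxt
      | some i =>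
        simLoop times k
          (PySem.List.pySetD nxt (i : Int) (m + PySem.List.pyGetD times (i : Int) 0)) m

-- Source B's opening ValueError guard (n < 1, empty times, or a service time < 1) raises only
-- outside Pre_solution, so it has no Lean arm
def solution_alt (n : Int) (times : List Int) : Int :=
  let D := times.foldl (fun a t => a * t) 1
  let N := times.foldl (fun a t => a + PySem.Int.floordiv D t) 0
  let T := -(PySem.Int.floordiv (-(n * D)) N)
  let c := times.foldl (fun a t => a + PySem.Int.floordiv T t) 0
  if n ≤ c then T
  else simLoop times (n - c).toNat (times.map (fun t => (PySem.Int.floordiv T t + 1) * t)) T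

-- ===== PRECONDITION & SPEC =====
-- Pre_ restricts to the task's natural domain: nonempty desk list, positive service times, at
-- least one person. Outside it A raises (ValueError on [], ZeroDivisionError on a zero time,
-- UnboundLocalError when n <= 0 with positive times) or, with negative entries, returns an
-- accidental value of its bisection on a non-monotone counter, while B's validation guard
-- raises ValueError on every such input (see the cites in claim.json).
def Pre_solution (n : Int) (times : List Int) : Prop :=
  times ≠ [] ∧ (∀ t ∈ times, 1 ≤ t) ∧ 1 ≤ n
instance (n : Int) (times : List Int) : Decidable (Pre_solution n times) := by
  unfold Pre_solution; infer_instance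

def pvWitness_solution : Int × List Int := (6, [7, 10])

def Spec_solution (n : Int) (times : List Int) (out : Int) : Prop := out = solution_alt n times
instance (n : Int) (times : List Int) (out : Int) : Decidable (Spec_solution n times out) := by
  unfold Spec_solution; infer_instance

-- ===== CLAIM (what is proved, stated in full; the proofs are below) =====
def Claim_equal_solution : Prop := ∀ (n : Int) (times : List Int), Dom_solution n times → Pre_solution n times → Spec_solution n times (solution n times)

-- ===== LEMMAS AND PROOFS =====

-- the completion count both characterizations compare with n
def cnt (times : List Int) (T : Int) : Int :=
  times.foldl (fun c x => c + PySem.Int.floordiv T x) 0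

lemma floordiv_nonneg' {T x : Int} (hT : 0 ≤ T) (hx : 1 ≤ x) :
    0 ≤ PySem.Int.floordiv T x := by
  rw [PySem.Int.floordiv_eq_ediv_of_pos (by omega)]
  exact Int.ediv_nonneg hT (by omega)

lemma floordiv_mono {T₁ T₂ x : Int} (hx : 1 ≤ x) (h : T₁ ≤ T₂) :
    PySem.Int.floordiv T₁ x ≤ PySem.Int.floordiv T₂ x := by
  rw [PySem.Int.floordiv_eq_ediv_of_pos (by omega),
      PySem.Int.floordiv_eq_ediv_of_pos (by omega)]
  exact Int.ediv_le_ediv (by omega) h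

lemma le_floordiv_of_mul_le {T c t : Int} (ht : 1 ≤ t) (h : c * t ≤ T) :
    c ≤ PySem.Int.floordiv T t := by
  rw [PySem.Int.floordiv_eq_ediv_of_pos (by omega)]
  exact (Int.le_ediv_iff_mul_le (by omega)).mpr h

lemma floordiv_le_of_lt_mul {T c t : Int} (ht : 1 ≤ t) (h : T < (c + 1) * t) :
    PySem.Int.floordiv T t ≤ c := by
  rw [PySem.Int.floordiv_eq_ediv_of_pos (by omega)]
  by_contra hc
  have hc1 : c + 1 ≤ T / t := by omega
  have h1 : (c + 1) * t ≤ (T / t) * t :=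
    mul_le_mul_of_nonneg_right hc1 (by omega)
  have h2 := Int.ediv_mul_le T (b := t) (by omega)
  omega

lemma cnt_foldl_acc (times : List Int) (T : Int) (acc : Int) :
    times.foldl (fun c x => c + PySem.Int.floordiv T x) acc = acc + cnt times T := by
  induction times generalizing acc with
  | nil => simp [cnt]
  | cons t ts ih =>
    simp only [cnt, List.foldl_cons] at *
    rw [ih, ih (0 + PySem.Int.floordiv T t)]
    ring

lemma cnt_cons (t : Int) (ts : List Int) (T : Int) :
    cnt (t :: ts) T = PySem.Int.floordiv T t + cnt ts T := by
  simp only [cnt, List.foldl_cons]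
  rw [cnt_foldl_acc]
  simp [cnt]

lemma cnt_mono {times : List Int} (hts : ∀ t ∈ times, 1 ≤ t) {T₁ T₂ : Int} (h : T₁ ≤ T₂) :
    cnt times T₁ ≤ cnt times T₂ := by
  induction times with
  | nil => simp [cnt]
  | cons t ts ih =>
    have h1 := floordiv_mono (hts t (by simp)) h
    have h2 := ih (fun x hx => hts x (by simp [hx]))
    rw [cnt_cons, cnt_cons]
    omega

lemma cnt_nonpos {times : List Int} (hts : ∀ t ∈ times, 1 ≤ t) {T : Int} (hT : T ≤ 0) :
    cnt times T ≤ 0 := by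
  have h0 : cnt times 0 = 0 := by
    induction times with
    | nil => simp [cnt]
    | cons t ts ih =>
      have ht := hts t (by simp)
      rw [cnt_cons]
      have h1 : PySem.Int.floordiv 0 t = 0 := by
        rw [PySem.Int.floordiv_eq_ediv_of_pos (by omega)]; simp
      rw [h1]
      have := ih (fun x hx => hts x (by simp [hx]))
      omega
  calc cnt times T ≤ cnt times 0 := cnt_mono hts hT
    _ = 0 := h0

lemma cnt_nonneg {times : List Int} (hts : ∀ t ∈ times, 1 ≤ t) {T : Int} (hT : 0 ≤ T) :
    0 ≤ cnt times T := by
  induction times with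
  | nil => simp [cnt]
  | cons t ts ih =>
    have h1 := floordiv_nonneg' hT (hts t (by simp))
    have h2 := ih (fun x hx => hts x (by simp [hx]))
    rw [cnt_cons]
    omega

lemma cnt_ge_single {times : List Int} (hts : ∀ t ∈ times, 1 ≤ t) {T x : Int}
    (hT : 0 ≤ T) (hx : x ∈ times) : PySem.Int.floordiv T x ≤ cnt times T := by
  induction times with
  | nil => simp at hx
  | cons t ts ih =>
    have hts' : ∀ y ∈ ts, 1 ≤ y := fun y hy => hts y (by simp [hy])
    rw [cnt_cons]
    rcases List.mem_cons.mp hx with rfl | hx'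
    · have := cnt_nonneg hts' hT
      omega
    · have h1 := ih hts' hx'
      have h2 := floordiv_nonneg' hT (hts t (by simp))
      omega

-- the early-break people counter decides exactly 'n <= cnt' when all contributions are nonnegative
lemma peopleLoop_ge_iff {n mid : Int} {times : List Int}
    (hts : ∀ t ∈ times, 1 ≤ t) (hmid : 0 ≤ mid) (acc : Int) :
    (n ≤ peopleLoop n mid acc times) ↔
      n ≤ times.foldl (fun c x => c + PySem.Int.floordiv mid x) acc := by
  induction times generalizing acc with
  | nil => simp [peopleLoop]
  | cons t ts ih =>
    have hts' : ∀ y ∈ ts, 1 ≤ y := fun y hy => hts y (by simp [hy])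
    have hd := floordiv_nonneg' hmid (hts t (by simp))
    simp only [peopleLoop, List.foldl_cons]
    split_ifs with hb
    · have hrest := cnt_nonneg hts' hmid
      rw [cnt_foldl_acc]
      simp only [cnt] at *
      constructor
      · intro _; omega
      · intro _; exact hb
    · exact ih hts' _

lemma char_unique {n : Int} {times : List Int} (hts : ∀ t ∈ times, 1 ≤ t)
    {a b : Int} (ha : n ≤ cnt times a) (ha' : ¬ n ≤ cnt times (a - 1))
    (hb : n ≤ cnt times b) (hb' : ¬ n ≤ cnt times (b - 1)) : a = b := by
  rcases lt_trichotomy a b with h | h | h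
  · exact absurd (le_trans ha (cnt_mono hts (show a ≤ b - 1 by omega))) hb'
  · exact h
  · exact absurd (le_trans hb (cnt_mono hts (show b ≤ a - 1 by omega))) ha'

-- A's while-loop invariant: the result is the least time with cnt >= n
lemma bsLoop_inv {n : Int} {times : List Int} (hts : ∀ t ∈ times, 1 ≤ t)
    {R0 : Int} (hPR0 : n ≤ cnt times R0) :
    ∀ (k : Nat) (left right : Int) (ans : Option Int),
      (right + 1 - left).toNat = k →
      1 ≤ left → left ≤ right + 1 →
      (∀ T, T < left → ¬ n ≤ cnt times T) →
      (ans = none → right = R0) →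
      (∀ a, ans = some a → a = right + 1 ∧ n ≤ cnt times a) →
      ∃ a, bsLoop n times left right ans = some a ∧
        n ≤ cnt times a ∧ ¬ n ≤ cnt times (a - 1) := by
  intro k
  induction k using Nat.strong_induction_on with
  | _ k IH =>
    intro left right ans hk h1 h2 h3 h4 h5
    rw [bsLoop]
    split_ifs with hlr
    · simp only []
      have hmid := PySem.Int.floordiv_two_mid_bounds hlr
      set mid := PySem.Int.floordiv (left + right) 2 with hmiddef
      have hmid0 : 0 ≤ mid := by omega
      have hbr := peopleLoop_ge_iff (n := n) hts hmid0 0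
      split_ifs with hp
      · -- people >= n : right = mid - 1, answer = mid
        have hPmid : n ≤ cnt times mid := by
          have := hbr.mp hp
          simpa [cnt] using this
        exact IH ((mid - 1) + 1 - left).toNat (by omega) left (mid - 1) (some mid)
          rfl h1 (by omega) h3 (by simp) (by intro a ha; cases ha; exact ⟨by ring, hPmid⟩)
      · -- people < n : left = mid + 1
        have hnPmid : ¬ n ≤ cnt times mid := by
          intro hc; exact hp (hbr.mpr (by simpa [cnt] using hc))
        refine IH (right + 1 - (mid + 1)).toNat (by omega) (mid + 1) right ans
          rfl (by omega) (by omega) ?_ h4 h5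
        intro T hT hc
        exact hnPmid (le_trans hc (cnt_mono hts (by omega)))
    · -- exit: left = right + 1
      have hL : left = right + 1 := by omega
      cases ans with
      | none =>
        exfalso
        have := h4 rfl
        exact h3 R0 (by omega) hPR0
      | some a =>
        obtain ⟨ha1, ha2⟩ := h5 a rfl
        exact ⟨a, rfl, ha2, h3 (a - 1) (by omega)⟩

lemma solution_char {n : Int} {times : List Int} {m : Int}
    (hmax : PySem.List.max? times (fun y => y) = some m)
    (hts : ∀ t ∈ times, 1 ≤ t) (hn : 1 ≤ n) :
    n ≤ cnt times (solution n times) ∧ ¬ n ≤ cnt times (solution n times - 1) := by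
  have hm : m ∈ times := PySem.List.max?_mem hmax
  have hm1 : 1 ≤ m := hts m hm
  have hR0 : 1 ≤ m * n := by nlinarith
  have hPR0 : n ≤ cnt times (m * n) := by
    have h1 : PySem.Int.floordiv (m * n) m = n := by
      rw [PySem.Int.floordiv_eq_ediv_of_pos (by omega), mul_comm,
        Int.mul_ediv_cancel _ (by omega)]
    have h2 := cnt_ge_single hts (by omega : (0:Int) ≤ m * n) hm
    omega
  obtain ⟨a, ha, ha2, ha3⟩ := bsLoop_inv hts hPR0 ((m * n + 1 - 1).toNat) 1 (m * n) none
    rfl (le_refl 1) (by omega)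
    (fun T hT hc => absurd (le_trans hc (cnt_nonpos hts (by omega))) (by omega))
    (fun _ => rfl) (by simp)
  have : solution n times = a := by
    simp only [solution, hmax, ha, Option.getD_some]
  rw [this]
  exact ⟨ha2, ha3⟩

-- ===== B-side lemmas: the simulation state =====

-- the per-desk state: cs counts finished inspections per desk, nxt holds ((cs[i])+1)*times[i]
def mkNxt (times : List Int) (cs : List Nat) : List Int :=
  List.zipWith (fun (c : Nat) (t : Int) => ((c : Int) + 1) * t) cs times

lemma length_mkNxt (times : List Int) (cs : List Nat) :
    (mkNxt times cs).length = min cs.length times.length := by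
  simp [mkNxt]

lemma sum_set_succ (cs : List Nat) (i : Nat) (hi : i < cs.length) :
    (cs.set i (cs[i] + 1)).sum = cs.sum + 1 := by
  induction cs generalizing i with
  | nil => simp at hi
  | cons c cs ih =>
    cases i with
    | zero => simp [List.set]; omega
    | succ j =>
      simp only [List.set, List.sum_cons, List.getElem_cons_succ]
      rw [ih j (by simpa using hi)]
      omega

lemma sum_le_cnt : ∀ (cs : List Nat) (ts : List Int) (hlen : cs.length = ts.length),
    (∀ t ∈ ts, 1 ≤ t) → ∀ {T : Int},
    (∀ j (hj : j < cs.length), ((cs[j] : Int)) * (ts[j]'(hlen ▸ hj)) ≤ T) →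
    (cs.sum : Int) ≤ cnt ts T := by
  intro cs
  induction cs with
  | nil =>
    intro ts hlen hts T h
    have : ts = [] := by
      cases ts with
      | nil => rfl
      | cons a as => exact absurd hlen (by simp)
    subst this
    simp [cnt]
  | cons c cs ih =>
    intro ts hlen hts T h
    cases ts with
    | nil => simp at hlen
    | cons t ts' =>
      have h0 := h 0 (by simp)
      simp only [List.getElem_cons_zero] at h0
      have hc : (c : Int) ≤ PySem.Int.floordiv T t :=
        le_floordiv_of_mul_le (hts t (by simp)) h0
      have hrest : ((cs.sum : Int)) ≤ cnt ts' T := by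
        refine ih ts' (by simpa using hlen) (fun x hx => hts x (by simp [hx])) ?_
        intro j hj
        have := h (j + 1) (by simpa using Nat.succ_lt_succ hj)
        simpa using this
      rw [cnt_cons]
      have hs : (((c :: cs).sum : Nat) : Int) = (c : Int) + (cs.sum : Int) := by
        simp [List.sum_cons]
      rw [hs]
      omega

lemma cnt_le_sum : ∀ (cs : List Nat) (ts : List Int) (hlen : cs.length = ts.length),
    (∀ t ∈ ts, 1 ≤ t) → ∀ {T : Int},
    (∀ j (hj : j < cs.length), T < ((cs[j] : Int) + 1) * (ts[j]'(hlen ▸ hj))) →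
    cnt ts T ≤ (cs.sum : Int) := by
  intro cs
  induction cs with
  | nil =>
    intro ts hlen hts T h
    have : ts = [] := by
      cases ts with
      | nil => rfl
      | cons a as => exact absurd hlen (by simp)
    subst this
    simp [cnt]
  | cons c cs ih =>
    intro ts hlen hts T h
    cases ts with
    | nil => simp at hlen
    | cons t ts' =>
      have h0 := h 0 (by simp)
      simp only [List.getElem_cons_zero] at h0
      have hc : PySem.Int.floordiv T t ≤ (c : Int) :=
        floordiv_le_of_lt_mul (hts t (by simp)) h0
      have hrest : cnt ts' T ≤ ((cs.sum : Int)) := by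
        refine ih ts' (by simpa using hlen) (fun x hx => hts x (by simp [hx])) ?_
        intro j hj
        have := h (j + 1) (by simpa using Nat.succ_lt_succ hj)
        simpa using this
      rw [cnt_cons]
      have hs : (((c :: cs).sum : Nat) : Int) = (c : Int) + (cs.sum : Int) := by
        simp [List.sum_cons]
      rw [hs]
      omega

lemma cnt_lt_sum : ∀ (cs : List Nat) (ts : List Int) (hlen : cs.length = ts.length),
    (∀ t ∈ ts, 1 ≤ t) → ∀ {T : Int},
    (∀ j (hj : j < cs.length), T < ((cs[j] : Int) + 1) * (ts[j]'(hlen ▸ hj))) →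
    (∃ j, ∃ (hj : j < cs.length), 1 ≤ cs[j] ∧ T < ((cs[j] : Int)) * (ts[j]'(hlen ▸ hj))) →
    cnt ts T < (cs.sum : Int) := by
  intro cs
  induction cs with
  | nil =>
    intro ts hlen hts T h hw
    obtain ⟨j, hj, _⟩ := hw
    simp at hj
  | cons c cs ih =>
    intro ts hlen hts T h hw
    cases ts with
    | nil => simp at hlen
    | cons t ts' =>
      have h0 := h 0 (by simp)
      simp only [List.getElem_cons_zero] at h0
      have hts' : ∀ x ∈ ts', 1 ≤ x := fun x hx => hts x (by simp [hx])
      have hlen' : cs.length = ts'.length := by simpa using hlen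
      have hshift : ∀ j (hj : j < cs.length), T < ((cs[j] : Int) + 1) * (ts'[j]'(hlen' ▸ hj)) := by
        intro j hj
        have := h (j + 1) (by simpa using Nat.succ_lt_succ hj)
        simpa using this
      rw [cnt_cons]
      have hs : (((c :: cs).sum : Nat) : Int) = (c : Int) + (cs.sum : Int) := by
        simp [List.sum_cons]
      rw [hs]
      obtain ⟨j, hj, hc1, hc2⟩ := hw
      cases j with
      | zero =>
        simp only [List.getElem_cons_zero] at hc1 hc2
        have hcd : PySem.Int.floordiv T t ≤ (c : Int) - 1 := by
          apply floordiv_le_of_lt_mul (hts t (by simp))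
          have he : ((c : Int) - 1 + 1) = (c : Int) := by ring
          rw [he]; exact hc2
        have hrest := cnt_le_sum cs ts' hlen' hts' hshift
        omega
      | succ j' =>
        simp only [List.getElem_cons_succ] at hc1 hc2
        have hj' : j' < cs.length := by simpa using hj
        have hrest := ih ts' hlen' hts' hshift ⟨j', hj', hc1, by simpa using hc2⟩
        have hcd : PySem.Int.floordiv T t ≤ (c : Int) :=
          floordiv_le_of_lt_mul (hts t (by simp)) h0
        omega

-- the simulation invariant: after popping, counts grow by one per round, the last popped
-- value f dominates all finished completions and is dominated by all pending ones
lemma simLoop_inv {times : List Int} (hts : ∀ t ∈ times, 1 ≤ t) (hne : times ≠ []) :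
    ∀ (k : Nat) (cs : List Nat) (f : Int) (hlen : cs.length = times.length),
      (∀ j (hj : j < cs.length), ((cs[j] : Int)) * (times[j]'(hlen ▸ hj)) ≤ f) →
      (∀ j (hj : j < cs.length), f ≤ ((cs[j] : Int) + 1) * (times[j]'(hlen ▸ hj))) →
      ∃ cs' : List Nat, ∃ (hl : cs'.length = times.length),
        cs'.sum = cs.sum + k ∧
        (∀ j (hj : j < cs'.length),
          ((cs'[j] : Int)) * (times[j]'(hl ▸ hj)) ≤ simLoop times k (mkNxt times cs) f) ∧
        (∀ j (hj : j < cs'.length),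
          simLoop times k (mkNxt times cs) f ≤ ((cs'[j] : Int) + 1) * (times[j]'(hl ▸ hj))) ∧
        ((k = 0 ∧ simLoop times k (mkNxt times cs) f = f ∧ cs' = cs) ∨
          ∃ j, ∃ (hj : j < cs'.length), 1 ≤ cs'[j] ∧
            simLoop times k (mkNxt times cs) f = ((cs'[j] : Int)) * (times[j]'(hl ▸ hj))) := by
  intro k
  induction k with
  | zero =>
    intro cs f hlen hlo hhi
    exact ⟨cs, hlen, by simp, hlo, hhi, Or.inl ⟨rfl, rfl, rfl⟩⟩
  | succ k ih =>
    intro cs f hlen hlo hhi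
    have hnxtlen : (mkNxt times cs).length = times.length := by
      rw [length_mkNxt, hlen]; omega
    have hnxtne : mkNxt times cs ≠ [] := by
      intro hc
      apply hne
      have := hnxtlen
      rw [hc] at this
      cases times <;> simp_all
    obtain ⟨m, hm⟩ : ∃ m, PySem.List.min? (mkNxt times cs) (fun y => y) = some m := by
      cases hM : PySem.List.min? (mkNxt times cs) (fun y => y) with
      | none => exact absurd ((PySem.List.min?_eq_none_iff _ _).mp hM) hnxtne
      | some m => exact ⟨m, rfl⟩
    have hmmem : m ∈ mkNxt times cs := PySem.List.min?_mem hm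
    have hmmin : ∀ y ∈ mkNxt times cs, m ≤ y := by
      intro y hy; exact PySem.List.min?_isMin hm y hy
    obtain ⟨i, hi⟩ : ∃ i, PySem.List.index? (mkNxt times cs) m = some i := by
      cases hI : PySem.List.index? (mkNxt times cs) m with
      | none => exact absurd ((PySem.List.index?_eq_none_iff _ _).mp hI) (by simp [hmmem])
      | some i => exact ⟨i, rfl⟩
    obtain ⟨hilt, hieq, -⟩ := PySem.List.getElem_of_index?_eq_some hi
    have hilt' : i < times.length := by omega
    have hics : i < cs.length := by omega
    have hmval : m = ((cs[i]'hics : Int) + 1) * (times[i]'hilt') := by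
      rw [← hieq]; simp [mkNxt]
    -- unfold one simulation step
    have hget : PySem.List.pyGetD times (i : Int) 0 = times[i]'hilt' := by
      rw [PySem.List.pyGetD_natCast]
      exact List.getD_eq_getElem times 0 hilt'
    have hset : PySem.List.pySetD (mkNxt times cs) (i : Int)
        (m + PySem.List.pyGetD times (i : Int) 0) =
        mkNxt times (cs.set i (cs[i]'hics + 1)) := by
      rw [hget, PySem.List.pySetD_natCast]
      apply List.ext_getElem
      · simp [mkNxt, hlen]
      · intro j h1 h2
        simp only [mkNxt, List.getElem_set, List.getElem_zipWith]
        by_cases hji : i = j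
        · subst hji
          simp only [if_pos rfl, hmval]
          push_cast
          ring
        · simp [hji]
    have hstep : simLoop times (k + 1) (mkNxt times cs) f =
        simLoop times k (mkNxt times (cs.set i (cs[i]'hics + 1))) m := by
      rw [simLoop]
      simp only [hm, hi]
      rw [hset]
    -- the new state satisfies the invariant with popped value m
    have hfm : f ≤ m := by
      rw [hmval]; exact hhi i hics
    have hlen2 : (cs.set i (cs[i]'hics + 1)).length = times.length := by
      simp [hlen]
    have hlo' : ∀ j (hj : j < (cs.set i (cs[i]'hics + 1)).length),
        (((cs.set i (cs[i]'hics + 1))[j] : Int)) *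
          (times[j]'(by simp only [List.length_set] at hj; omega)) ≤ m := by
      intro j hj
      have hjcs : j < cs.length := by simpa using hj
      simp only [List.getElem_set]
      by_cases hji : i = j
      · subst hji
        simp only [if_pos rfl, hmval]
        push_cast
        omega
      · rw [if_neg hji]
        exact le_trans (hlo j hjcs) hfm
    have hhi' : ∀ j (hj : j < (cs.set i (cs[i]'hics + 1)).length),
        m ≤ (((cs.set i (cs[i]'hics + 1))[j] : Int) + 1) *
          (times[j]'(by simp only [List.length_set] at hj; omega)) := by
      intro j hj
      have hjcs : j < cs.length := by simpa using hj
      have hjt : j < times.length := by omega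
      simp only [List.getElem_set]
      by_cases hji : i = j
      · subst hji
        simp only [if_pos rfl, hmval]
        have := hts (times[i]'hjt) (List.getElem_mem hjt)
        push_cast
        nlinarith
      · rw [if_neg hji]
        have hmem : ((cs[j]'hjcs : Int) + 1) * (times[j]'hjt) ∈ mkNxt times cs := by
          have hg : (mkNxt times cs)[j]'(by omega) =
              ((cs[j]'hjcs : Int) + 1) * (times[j]'hjt) := by
            simp [mkNxt]
          rw [← hg]
          exact List.getElem_mem (by omega)
        exact hmmin _ hmem
    obtain ⟨cs', hl1, hl2, hl3, hl4, hl5⟩ :=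
      ih (cs.set i (cs[i]'hics + 1)) m hlen2 hlo' hhi'
    refine ⟨cs', hl1, ?_, by rw [hstep]; exact hl3, by rw [hstep]; exact hl4, ?_⟩
    · rw [hl2, sum_set_succ cs i hics]; omega
    · rcases hl5 with ⟨-, heq, hcs⟩ | ⟨j, hj, hw1, hw2⟩
      · -- k = 0: the last pop produced m = (cs[i]+1)*times[i]; the witness is index i
        subst hcs
        refine Or.inr ⟨i, by simpa using hics, ?_, ?_⟩
        · simp [List.getElem_set]
        · rw [hstep, heq, hmval]
          simp only [List.getElem_set, if_pos rfl]
          push_cast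
          ring
      · exact Or.inr ⟨j, hj, hw1, by rw [hstep]; exact hw2⟩

-- ===== B-side lemmas: the rate estimate =====

lemma floordiv_mul_le {T t : Int} (ht : 1 ≤ t) : PySem.Int.floordiv T t * t ≤ T := by
  rw [PySem.Int.floordiv_eq_ediv_of_pos (by omega)]
  have h1 := Int.ediv_add_emod T t
  have h2 := Int.emod_nonneg T (by omega : t ≠ 0)
  have e : T / t * t = t * (T / t) := by ring
  omega

lemma lt_floordiv_succ_mul {T t : Int} (ht : 1 ≤ t) : T < (PySem.Int.floordiv T t + 1) * t := by
  rw [PySem.Int.floordiv_eq_ediv_of_pos (by omega)]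
  have h1 := Int.ediv_add_emod T t
  have h3 := Int.emod_lt_of_pos T (by omega : 0 < t)
  have e : (T / t + 1) * t = t * (T / t) + t := by ring
  omega

lemma prod_one_le : ∀ (ts : List Int), (∀ t ∈ ts, 1 ≤ t) → 1 ≤ ts.prod := by
  intro ts
  induction ts with
  | nil => intro _; simp
  | cons t ts ih =>
    intro h
    rw [List.prod_cons]
    have h1 := h t (by simp)
    have h2 := ih (fun x hx => h x (by simp [hx]))
    nlinarith

lemma cnt_mul_le (D : Int) (hD1 : 1 ≤ D) :
    ∀ (ts : List Int), (∀ t ∈ ts, 1 ≤ t ∧ t ∣ D) → ∀ {T : Int}, 0 ≤ T →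
      cnt ts T * D ≤ T * cnt ts D := by
  intro ts
  induction ts with
  | nil => intro _ T _; simp [cnt]
  | cons t ts ih =>
    intro h T hT
    obtain ⟨ht, htd⟩ := h t (by simp)
    have hrec := ih (fun x hx => h x (by simp [hx])) hT
    rw [cnt_cons, cnt_cons]
    have hm0 : 0 ≤ D / t := Int.ediv_nonneg (by omega) (by omega)
    have hDt : t * (D / t) = D := Int.mul_ediv_cancel' htd
    have hfdDt : PySem.Int.floordiv D t = D / t :=
      PySem.Int.floordiv_eq_ediv_of_pos (by omega)
    have hhead : PySem.Int.floordiv T t * D ≤ T * PySem.Int.floordiv D t := by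
      rw [hfdDt]
      calc PySem.Int.floordiv T t * D
          = PySem.Int.floordiv T t * (t * (D / t)) := by rw [hDt]
        _ = (PySem.Int.floordiv T t * t) * (D / t) := by ring
        _ ≤ T * (D / t) := mul_le_mul_of_nonneg_right (floordiv_mul_le ht) hm0
    calc (PySem.Int.floordiv T t + cnt ts T) * D
        = PySem.Int.floordiv T t * D + cnt ts T * D := by ring
      _ ≤ T * PySem.Int.floordiv D t + T * cnt ts D := add_le_add hhead hrec
      _ = T * (PySem.Int.floordiv D t + cnt ts D) := by ring

lemma sum_map_floordiv : ∀ (ts : List Int), (∀ t ∈ ts, 1 ≤ t) → ∀ {T : Int}, 0 ≤ T →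
    (((ts.map (fun t => (PySem.Int.floordiv T t).toNat)).sum : Nat) : Int) = cnt ts T := by
  intro ts
  induction ts with
  | nil => intro _ T _; simp [cnt]
  | cons t ts ih =>
    intro h T hT
    have h1 := h t (by simp)
    have hrec := ih (fun x hx => h x (by simp [hx])) hT
    rw [cnt_cons]
    simp only [List.map_cons, List.sum_cons, Nat.cast_add]
    rw [Int.toNat_of_nonneg (floordiv_nonneg' hT h1), hrec]

lemma mkNxt_map (times : List Int) (hts : ∀ t ∈ times, 1 ≤ t) {T : Int} (hT : 0 ≤ T) :
    times.map (fun t => (PySem.Int.floordiv T t + 1) * t) =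
      mkNxt times (times.map (fun t => (PySem.Int.floordiv T t).toNat)) := by
  apply List.ext_getElem
  · simp [mkNxt]
  · intro j h1 h2
    simp only [mkNxt, List.getElem_map, List.getElem_zipWith]
    rw [Int.toNat_of_nonneg (floordiv_nonneg' hT (hts _ (List.getElem_mem _)))]

lemma solution_alt_char {n : Int} {times : List Int}
    (hne : times ≠ []) (hts : ∀ t ∈ times, 1 ≤ t) (hn : 1 ≤ n) :
    n ≤ cnt times (solution_alt n times) ∧ ¬ n ≤ cnt times (solution_alt n times - 1) := by
  set D := times.foldl (fun a t => a * t) 1 with hDdef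
  have hDprod : D = times.prod := by rw [hDdef, List.prod_eq_foldl]
  have hD1 : 1 ≤ D := hDprod ▸ prod_one_le times hts
  have hdvd : ∀ t ∈ times, t ∣ D := fun t ht => hDprod ▸ List.dvd_prod ht
  set N := times.foldl (fun a t => a + PySem.Int.floordiv D t) 0 with hNdef
  have hNcnt : N = cnt times D := rfl
  have hN1 : 1 ≤ N := by
    obtain ⟨t0, ht0⟩ : ∃ t0, t0 ∈ times := by
      cases times with
      | nil => exact absurd rfl hne
      | cons a as => exact ⟨a, by simp⟩
    have h1t : 1 ≤ t0 := hts _ ht0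
    have hle : t0 ≤ D := Int.le_of_dvd (by omega) (hdvd _ ht0)
    have hfd : 1 ≤ PySem.Int.floordiv D t0 := by
      rw [PySem.Int.floordiv_eq_ediv_of_pos (by omega)]
      refine (Int.le_ediv_iff_mul_le (by omega)).mpr ?_
      rw [one_mul]; exact hle
    have := cnt_ge_single hts (by omega : (0:Int) ≤ D) ht0
    rw [hNcnt]
    omega
  have hnD1 : 1 ≤ n * D := by nlinarith
  set q := PySem.Int.floordiv (-(n * D)) N with hqdef
  have hq : N * q ≤ -(n * D) ∧ -(n * D) < N * q + N := by
    rw [hqdef, PySem.Int.floordiv_eq_ediv_of_pos (by omega)]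
    have h1 := Int.ediv_add_emod (-(n * D)) N
    have h2 := Int.emod_nonneg (-(n * D)) (by omega : N ≠ 0)
    have h3 := Int.emod_lt_of_pos (-(n * D)) (by omega : 0 < N)
    constructor <;> omega
  set T := -q with hTdef
  have hT1 : 1 ≤ T := by
    by_contra hc
    have hq0 : 0 ≤ q := by omega
    have := mul_nonneg (by omega : (0:Int) ≤ N) hq0
    omega
  have hTlow : cnt times (T - 1) < n := by
    have hkey : (T - 1) * N < n * D := by
      have e : (T - 1) * N = -(N * q) - N := by rw [hTdef]; ring
      omega
    have hmul := cnt_mul_le D hD1 times (fun t ht => ⟨hts t ht, hdvd t ht⟩)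
      (show (0:Int) ≤ T - 1 by omega)
    rw [← hNcnt] at hmul
    by_contra hcc
    have hge : n ≤ cnt times (T - 1) := by omega
    have := mul_le_mul_of_nonneg_right hge (by omega : (0:Int) ≤ D)
    omega
  set c := times.foldl (fun a t => a + PySem.Int.floordiv T t) 0 with hcdef
  have hccnt : c = cnt times T := rfl
  have halt : solution_alt n times =
      if n ≤ c then T
      else simLoop times (n - c).toNat
        (times.map (fun t => (PySem.Int.floordiv T t + 1) * t)) T := rfl
  by_cases hcn : n ≤ c
  · rw [halt, if_pos hcn]
    rw [hccnt] at hcn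
    exact ⟨hcn, by omega⟩
  · rw [halt, if_neg hcn]
    set cs0 := times.map (fun t => (PySem.Int.floordiv T t).toNat) with hcs0def
    have hlen0 : cs0.length = times.length := by simp [hcs0def]
    have hlo0 : ∀ j (hj : j < cs0.length),
        ((cs0[j] : Int)) * (times[j]'(hlen0 ▸ hj)) ≤ T := by
      intro j hj
      have hjt : j < times.length := hlen0 ▸ hj
      have htj := hts _ (List.getElem_mem hjt)
      simp only [hcs0def, List.getElem_map]
      rw [Int.toNat_of_nonneg (floordiv_nonneg' (by omega) htj)]
      exact floordiv_mul_le htj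
    have hhi0 : ∀ j (hj : j < cs0.length),
        T ≤ ((cs0[j] : Int) + 1) * (times[j]'(hlen0 ▸ hj)) := by
      intro j hj
      have hjt : j < times.length := hlen0 ▸ hj
      have htj := hts _ (List.getElem_mem hjt)
      simp only [hcs0def, List.getElem_map]
      rw [Int.toNat_of_nonneg (floordiv_nonneg' (by omega) htj)]
      exact le_of_lt (lt_floordiv_succ_mul htj)
    obtain ⟨cs', hl1, h2, h3, h4, h5⟩ :=
      simLoop_inv hts hne (n - c).toNat cs0 T hlen0 hlo0 hhi0
    rw [mkNxt_map times hts (by omega : (0:Int) ≤ T), ← hcs0def]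
    have hsum0 : ((cs0.sum : Nat) : Int) = cnt times T := by
      rw [hcs0def]
      exact sum_map_floordiv times hts (by omega)
    have hsum : (cs'.sum : Int) = n := by
      have hcast := congrArg (fun x : Nat => (x : Int)) h2
      simp only [Nat.cast_add] at hcast
      rw [hsum0, Int.toNat_of_nonneg (by rw [hccnt] at hcn; omega)] at hcast
      rw [hccnt] at hcn
      rw [hcast, ← hccnt]
      omega
    constructor
    · have hle := sum_le_cnt cs' times hl1 hts h3
      omega
    · intro hcc
      have hk1 : (n - c).toNat ≠ 0 := by
        rw [hccnt] at hcn ⊢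
        omega
      have hwit : ∃ j, ∃ (hj : j < cs'.length), 1 ≤ cs'[j] ∧
          (simLoop times (n - c).toNat (mkNxt times cs0) T - 1) <
            ((cs'[j] : Int)) * (times[j]'(hl1 ▸ hj)) := by
        rcases h5 with ⟨hk0, -, -⟩ | ⟨j, hj, hw1, hw2⟩
        · exact absurd hk0 hk1
        · exact ⟨j, hj, hw1, by omega⟩
      have := cnt_lt_sum cs' times hl1 hts
        (fun j hj => by have := h4 j hj; omega) hwit
      omega

-- ===== VERDICT (by name: the statement is the Claim_ definition above) =====
theorem solution_spec : Claim_equal_solution := by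
  intro n times _ hpre
  obtain ⟨hne, hts, hn⟩ := hpre
  obtain ⟨m, hmax⟩ : ∃ m, PySem.List.max? times (fun y => y) = some m := by
    cases hM : PySem.List.max? times (fun y => y) with
    | none => exact absurd ((PySem.List.max?_eq_none_iff times (fun y => y)).mp hM) hne
    | some m => exact ⟨m, rfl⟩
  obtain ⟨ha1, ha2⟩ := solution_char hmax hts hn
  obtain ⟨hb1, hb2⟩ := solution_alt_char hne hts hn
  exact char_unique hts ha1 ha2 hb1 hb2
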